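-- pv_equiv track=rewrite | github.com/donovandicks/aoc | 2024/main.py | fix_and_count_incorrect
-- ===== SOURCE A (Python) =====
-- from collections import defaultdict
-- from functools import cmp_to_key, partial, reduce
--
-- def fix_and_count_incorrect(
--     rules: defaultdict[str, set[str]], updates: list[list[str]]
-- ) -> int:
--     incorrect: list[list[str]] = []
--     for update in updates:
--         if any(
--             set(update[:i]).intersection(rules.get(num, set()))
--             for i, num in enumerate(update)
--         ):
--             incorrect.append(update)
--
--     ruleset = set()
--     for x, ys in rules.items():
--         for y in ys:
--             ruleset.add((x, y))
--
--     def sort_(a: str, b: str) -> int: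
--         if (a, b) in ruleset:
--             return -1
--         elif (b, a) in ruleset:
--             return 1
--         else:
--             return 0
--
--     for update in incorrect:
--         update.sort(key=cmp_to_key(sort_))
--
--     return sum(int(update[len(update) // 2]) for update in incorrect)
-- ===== SOURCE B (Python) =====
-- from functools import cmp_to_key
--
--
-- def fix_and_count_incorrect(rules, updates):
--     # Sort-and-compare: instead of A's prefix-set intersection scan to
--     # detect violations, sort each update in place with the rule
--     # comparator and detect incorrectness by whether the sort changed it;
--     # no `incorrect` list and no materialised ruleset of pairs.
--     def cmp(a, b):
--         if b in rules.get(a, ()):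
--             return -1
--         if a in rules.get(b, ()):
--             return 1
--         return 0
--
--     key = cmp_to_key(cmp)
--     total = 0
--     for u in updates:
--         ref = list(u)
--         u.sort(key=key)
--         if u != ref:
--             total += int(u[len(u) // 2])
--     return total
-- ===== Notes on version B (the rewrite author's own statement) =====
-- stated objective: simpler
-- what changed: B replaces A's detection machinery (per-position prefix-set/ruleset-intersection scan, a collected incorrect[] list, a separately materialised set of rule pairs, then a second sorting pass) with sort-and-compare: one pass that sorts each update in place with a comparator reading the rules dict directly and counts the middle page exactly when the sort reordered the update.
-- outside the precondition, e.g. on fix_and_count_incorrect({'1': {'2', 'x'}}, [['2', 'x', '1']]): A returns 2, B returns 2; on fix_and_count_incorrect({'1': {'2'}, '2': {'1'}}, [['2', '1']]): A returns 2, B returns 2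
import Mathlib
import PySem

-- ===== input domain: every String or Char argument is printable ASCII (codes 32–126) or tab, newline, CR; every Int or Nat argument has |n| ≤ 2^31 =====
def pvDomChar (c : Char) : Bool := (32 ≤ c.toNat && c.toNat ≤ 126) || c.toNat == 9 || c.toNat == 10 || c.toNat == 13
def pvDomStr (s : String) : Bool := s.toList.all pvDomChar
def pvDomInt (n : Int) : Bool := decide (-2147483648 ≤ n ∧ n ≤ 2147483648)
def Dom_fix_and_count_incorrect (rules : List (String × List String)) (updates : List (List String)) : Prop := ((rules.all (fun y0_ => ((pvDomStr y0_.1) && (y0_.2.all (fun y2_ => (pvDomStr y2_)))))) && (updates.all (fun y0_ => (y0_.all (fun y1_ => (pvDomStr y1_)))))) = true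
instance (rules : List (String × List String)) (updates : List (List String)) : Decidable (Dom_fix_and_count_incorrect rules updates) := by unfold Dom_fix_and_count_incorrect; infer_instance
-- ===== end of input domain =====

-- B replaces A's detection machinery (prefix-set intersection scan, collected incorrect[] list,
-- materialised ruleset of pairs, second sorting pass) by sort-and-compare: one pass that sorts each
-- update in place with a comparator reading the rules dict directly and counts the middle page
-- exactly when the sort reordered the update; objective: simpler. Like A, the Python B sorts the
-- mis-ordered updates in place (same observable mutation under Pre_, where the sort leaves correct
-- updates unchanged); the equivalence proved here is about the return value.


-- ===== PORT A =====
-- `update.sort(key=cmp_to_key(f))` has no PySem primitive; hand port as a stable insertion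
-- sort over the comparator. CPython's sort is some stable sort, so this is exact wherever
-- the comparator is a strict weak order on the list's elements — Pre_ guarantees that for
-- every list whose sortedness matters (both Pythons sort via list.sort with their comparator).
def pvInsertCmp (cmp : String → String → Int) (x : String) : List String → List String
  | [] => [x]
  | y :: ys => if cmp x y < 0 then x :: y :: ys else y :: pvInsertCmp cmp x ys

def pvSortCmp (cmp : String → String → Int) (xs : List String) : List String :=
  xs.foldl (fun acc x => pvInsertCmp cmp x acc) []

-- the comparator `sort_` of A, over the materialised ruleset of pairs
def pvSortA (ruleset : PySem.Set (String × String)) (a b : String) : Int :=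
  if PySem.Set.contains ruleset (a, b) then -1
  else if PySem.Set.contains ruleset (b, a) then 1
  else 0

def fix_and_count_incorrect (rules : List (String × List String)) (updates : List (List String)) : Int :=
  -- `rules` is the dict (assoc list, first-match lookup)
  let rulesD : PySem.Dict String (List String) := PySem.Dict.mk rules
  -- for update in updates: if any(set(update[:i]) & rules.get(num, set()) for i, num in enumerate(update)): incorrect.append(update)
  let incorrect : List (List String) :=
    updates.foldl (fun acc update =>
      if (PySem.List.enumerate update).any (fun p =>
            !(PySem.Set.inter (PySem.Set.ofList (PySem.List.slice update none (some p.1)))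
                (PySem.Set.ofList (rulesD.getD p.2 []))).isEmpty)
      then acc ++ [update] else acc) []
  -- ruleset = set(); for x, ys in rules.items(): for y in ys: ruleset.add((x, y))
  let ruleset : PySem.Set (String × String) :=
    rules.foldl (fun rs p => p.2.foldl (fun rs y => PySem.Set.add rs (p.1, y)) rs) PySem.Set.empty
  -- for update in incorrect: update.sort(key=cmp_to_key(sort_))
  let fixed : List (List String) := incorrect.map (fun update => pvSortCmp (pvSortA ruleset) update)
  -- sum(int(update[len(update) // 2]) for update in incorrect)
  -- int(s) is ofStr?; its ValueError (none) is excluded by Pre_, so .getD 0 is unreachable there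
  (fixed.map (fun update =>
      (PySem.Int.ofStr? (PySem.List.pyGetD update
        (PySem.Int.floordiv (PySem.List.len update) 2) "")).getD 0)).sum

-- ===== PORT B =====
-- B's comparator looks the rules dict up directly
def pvCmpB (rulesD : PySem.Dict String (List String)) (a b : String) : Int :=
  if (rulesD.getD a []).contains b then -1
  else if (rulesD.getD b []).contains a then 1
  else 0

def fix_and_count_incorrect_alt (rules : List (String × List String)) (updates : List (List String)) : Int :=
  let rulesD : PySem.Dict String (List String) := PySem.Dict.mk rules
  -- for u in updates: ref = list(u); u.sort(key=key); if u != ref: total += int(u[len(u)//2])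
  updates.foldl (fun total u =>
    if pvSortCmp (pvCmpB rulesD) u ≠ u then
      total + (PySem.Int.ofStr? (PySem.List.pyGetD (pvSortCmp (pvCmpB rulesD) u)
                 (PySem.Int.floordiv (PySem.List.len (pvSortCmp (pvCmpB rulesD) u)) 2) "")).getD 0
    else total) 0

-- ===== PRECONDITION & SPEC =====
-- b comes before a according to the rules dict
def pvLt (rulesD : PySem.Dict String (List String)) (a b : String) : Bool :=
  (rulesD.getD a []).contains b

-- some page of `u` has, somewhere before it, a page the rules place after it
def pvMisordered (rulesD : PySem.Dict String (List String)) (u : List String) : Bool :=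
  (List.range u.length).any fun j => (u.take j).any fun e => pvLt rulesD (u.getD j "") e

-- the rules order is a strict weak order on the pages of `u`
def pvSWO (rulesD : PySem.Dict String (List String)) (u : List String) : Bool :=
  (u.all fun a => u.all fun b => !(pvLt rulesD a b && pvLt rulesD b a)) &&
  (u.all fun a => u.all fun b => u.all fun c =>
      !(pvLt rulesD a b) || !(pvLt rulesD b c) || pvLt rulesD a c) &&
  (u.all fun a => u.all fun b => u.all fun c =>
      pvLt rulesD a b || pvLt rulesD b a || pvLt rulesD b c || pvLt rulesD c b ||
      !(pvLt rulesD a c || pvLt rulesD c a))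

-- Pre_ excludes three kinds of inputs on which the claim would be meaningless or A's value accidental:
-- (1) association lists with duplicate keys — a Python dict cannot carry them, so they correspond to
--     no Python input, and on them A's all-pairs ruleset and the first-match lookup disagree arbitrarily;
-- (2) mis-ordered updates containing a page that is not int-parsable — int() raises ValueError on the
--     page the sort puts in the middle (slightly wider than the exact raise set: a non-int page that
--     lands off-middle leaves A returning, see cites);
-- (3) mis-ordered updates whose pages the rules do not order as a strict weak order — CPython leaves
--     list.sort's result unspecified for an inconsistent comparator, so A's value there is an accident
--     of Timsort that no port can claim.
def Pre_fix_and_count_incorrect (rules : List (String × List String)) (updates : List (List String)) : Prop :=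
  (rules.map Prod.fst).Nodup ∧
  ∀ u ∈ updates, pvMisordered (PySem.Dict.mk rules) u = true →
    ((∀ s ∈ u, (PySem.Int.ofStr? s).isSome = true) ∧ pvSWO (PySem.Dict.mk rules) u = true)

instance (rules : List (String × List String)) (updates : List (List String)) : Decidable (Pre_fix_and_count_incorrect rules updates) := by unfold Pre_fix_and_count_incorrect; infer_instance

def pvWitness_fix_and_count_incorrect : (List (String × List String)) × List (List String) :=
  ([("1", ["2"])], [["2", "1"]])

def Spec_fix_and_count_incorrect (rules : List (String × List String)) (updates : List (List String)) (out : Int) : Prop := out = fix_and_count_incorrect_alt rules updates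
instance (rules : List (String × List String)) (updates : List (List String)) (out : Int) : Decidable (Spec_fix_and_count_incorrect rules updates out) := by unfold Spec_fix_and_count_incorrect; infer_instance

-- ===== CLAIM (what is proved, stated in full; the proofs are below) =====
def Claim_equal_fix_and_count_incorrect : Prop := ∀ (rules : List (String × List String)) (updates : List (List String)), Dom_fix_and_count_incorrect rules updates → Pre_fix_and_count_incorrect rules updates → Spec_fix_and_count_incorrect rules updates (fix_and_count_incorrect rules updates)

-- ===== LEMMAS AND PROOFS =====

-- membership in A's materialised ruleset
theorem pv_mem_ruleset (rules : List (String × List String)) (s : PySem.Set (String × String))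
    (a b : String) :
    (a, b) ∈ rules.foldl (fun rs p => p.2.foldl (fun rs y => PySem.Set.add rs (p.1, y)) rs) s ↔
      (a, b) ∈ s ∨ ∃ p ∈ rules, p.1 = a ∧ b ∈ p.2 := by
  induction rules generalizing s with
  | nil => simp
  | cons p rules ih =>
    rw [List.foldl_cons, ih, ← PySem.Set.update_map_eq_foldl_add, PySem.Set.mem_update]
    simp only [List.mem_map, List.mem_cons, Prod.mk.injEq]
    aesop

-- first-match dict lookup under distinct keys
theorem pv_contains_getD (rules : List (String × List String)) (a b : String)
    (hnd : (rules.map Prod.fst).Nodup) :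
    ((PySem.Dict.mk rules).getD a []).contains b = true ↔ ∃ p ∈ rules, p.1 = a ∧ b ∈ p.2 := by
  induction rules with
  | nil => simp [PySem.Dict.getD, PySem.Dict.get?]
  | cons p rules ih =>
    obtain ⟨k, v⟩ := p
    simp only [List.map_cons, List.nodup_cons] at hnd
    have hstep : (PySem.Dict.mk ((k, v) :: rules)).getD a [] =
        if k == a then v else (PySem.Dict.mk rules).getD a [] := by
      simp only [PySem.Dict.getD, PySem.Dict.get?_mk_cons]
      split <;> rfl
    by_cases hpa : k = a
    · have hnotin : ∀ q ∈ rules, q.1 ≠ a := by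
        intro q hq hqa
        exact hnd.1 (hpa ▸ hqa ▸ (List.mem_map_of_mem hq : q.1 ∈ rules.map Prod.fst))
      rw [hstep, if_pos (by simp [hpa])]
      simp only [List.contains_eq_mem, decide_eq_true_eq, List.mem_cons]
      constructor
      · intro hb; exact ⟨(k, v), Or.inl rfl, hpa, hb⟩
      · rintro ⟨q, hq, hqa, hbq⟩
        rcases hq with hq' | hq'
        · subst hq'; exact hbq
        · exact absurd hqa (hnotin q hq')
    · rw [hstep, if_neg (by simp [hpa]), ih hnd.2]
      constructor
      · rintro ⟨q, hq, hqa, hbq⟩; exact ⟨q, List.mem_cons_of_mem _ hq, hqa, hbq⟩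
      · rintro ⟨q, hq, hqa, hbq⟩
        rcases List.mem_cons.mp hq with hq' | hq'
        · subst hq'; exact absurd hqa hpa
        · exact ⟨q, hq', hqa, hbq⟩

-- under distinct keys A's comparator IS B's comparator
theorem pv_cmp_eq (rules : List (String × List String))
    (hnd : (rules.map Prod.fst).Nodup) :
    pvSortA (rules.foldl (fun rs p => p.2.foldl (fun rs y => PySem.Set.add rs (p.1, y)) rs)
        PySem.Set.empty) = pvCmpB (PySem.Dict.mk rules) := by
  funext a b
  have key : ∀ x y : String,
      PySem.Set.contains (rules.foldl (fun rs p => p.2.foldl (fun rs y => PySem.Set.add rs (p.1, y)) rs)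
        PySem.Set.empty) (x, y) = ((PySem.Dict.mk rules).getD x []).contains y := by
    intro x y
    rw [Bool.eq_iff_iff, PySem.Set.contains_iff, pv_mem_ruleset, pv_contains_getD _ _ _ hnd]
    simp [PySem.Set.empty]
  simp only [pvSortA, pvCmpB, key]

-- B's comparator orders by pvLt
theorem pv_cmpB_lt (rd : PySem.Dict String (List String)) (a b : String) :
    pvCmpB rd a b < 0 ↔ pvLt rd a b = true := by
  unfold pvCmpB pvLt
  cases h1 : (rd.getD a []).contains b <;> cases h2 : (rd.getD b []).contains a <;> simp

-- membership through the insertion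
theorem pv_mem_insertCmp (cmp : String → String → Int) (x z : String) (ys : List String) :
    z ∈ pvInsertCmp cmp x ys ↔ z = x ∨ z ∈ ys := by
  induction ys with
  | nil => simp [pvInsertCmp]
  | cons y ys ih => simp only [pvInsertCmp]; split <;> simp [ih, or_comm, or_left_comm]

-- an element the rules place after nothing already present is appended
theorem pv_insert_append (rd : PySem.Dict String (List String)) (x : String) (acc : List String)
    (h : ∀ y ∈ acc, pvLt rd x y = false) :
    pvInsertCmp (pvCmpB rd) x acc = acc ++ [x] := by
  induction acc with
  | nil => rfl
  | cons y ys ih =>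
    have hy : ¬ pvCmpB rd x y < 0 := by
      rw [pv_cmpB_lt]; simp [h y (List.mem_cons_self)]
    simp only [pvInsertCmp, if_neg hy, List.cons_append, List.cons.injEq, true_and]
    exact ih (fun z hz => h z (List.mem_cons_of_mem _ hz))

-- sorting a list with no rule violation is the identity
theorem pv_sort_id_aux (rd : PySem.Dict String (List String)) :
    ∀ (l acc : List String), (∀ z ∈ l, ∀ y ∈ acc, pvLt rd z y = false) →
    l.Pairwise (fun a b => pvLt rd b a = false) →
    l.foldl (fun acc x => pvInsertCmp (pvCmpB rd) x acc) acc = acc ++ l := by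
  intro l
  induction l with
  | nil => simp
  | cons x xs ih =>
    intro acc hcr hp
    rw [List.pairwise_cons] at hp
    rw [List.foldl_cons, pv_insert_append rd x acc (hcr x List.mem_cons_self)]
    rw [ih (acc ++ [x]) ?_ hp.2]
    · simp
    · intro z hz y hy
      rcases List.mem_append.mp hy with hy | hy
      · exact hcr z (List.mem_cons_of_mem _ hz) y hy
      · simp only [List.mem_singleton] at hy; subst hy; exact hp.1 z hz

theorem pv_sort_id (rd : PySem.Dict String (List String)) (u : List String)
    (hp : u.Pairwise (fun a b => pvLt rd b a = false)) :
    pvSortCmp (pvCmpB rd) u = u := by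
  simpa using pv_sort_id_aux rd u [] (by simp) hp

-- insertion keeps the acc pairwise-ordered (needs asymmetry and transitivity on S ⊇ elements)
theorem pv_insert_pairwise (rd : PySem.Dict String (List String)) (S : List String)
    (hasym : ∀ a ∈ S, ∀ b ∈ S, ¬(pvLt rd a b = true ∧ pvLt rd b a = true))
    (htrans : ∀ a ∈ S, ∀ b ∈ S, ∀ c ∈ S, pvLt rd a b = true → pvLt rd b c = true → pvLt rd a c = true)
    (x : String) (hx : x ∈ S) :
    ∀ acc : List String, (∀ y ∈ acc, y ∈ S) →
      acc.Pairwise (fun a b => pvLt rd b a = false) →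
      (pvInsertCmp (pvCmpB rd) x acc).Pairwise (fun a b => pvLt rd b a = false) := by
  intro acc
  induction acc with
  | nil => intro _ _; simp [pvInsertCmp]
  | cons h t ih =>
    intro hsub hp
    rw [List.pairwise_cons] at hp
    have hhS : h ∈ S := hsub h List.mem_cons_self
    have htS : ∀ z ∈ t, z ∈ S := fun z hz => hsub z (List.mem_cons_of_mem _ hz)
    by_cases hc : pvCmpB rd x h < 0
    · have hxh : pvLt rd x h = true := (pv_cmpB_lt rd x h).mp hc
      simp only [pvInsertCmp, if_pos hc]
      rw [List.pairwise_cons]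
      refine ⟨?_, List.pairwise_cons.mpr hp⟩
      intro z hz
      rcases List.mem_cons.mp hz with hzh | hzt
      · subst hzh
        by_contra hzx
        have hzx' : pvLt rd z x = true := by revert hzx; cases pvLt rd z x <;> simp
        exact hasym x hx z hhS ⟨hxh, hzx'⟩
      · by_contra hzx
        have hzx' : pvLt rd z x = true := by revert hzx; cases pvLt rd z x <;> simp
        have hzh : pvLt rd z h = true :=
          htrans z (htS z hzt) x hx h hhS hzx' hxh
        rw [hp.1 z hzt] at hzh
        exact Bool.false_ne_true hzh
    · have hxh : pvLt rd x h = false := by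
        have := (pv_cmpB_lt rd x h).not.mp hc
        revert this; cases pvLt rd x h <;> simp
      simp only [pvInsertCmp, if_neg hc]
      rw [List.pairwise_cons]
      refine ⟨?_, ih htS hp.2⟩
      intro z hz
      rcases (pv_mem_insertCmp _ _ _ _).mp hz with hzx | hzt
      · subst hzx; exact hxh
      · exact hp.1 z hzt

-- the sorted list is pairwise-ordered and stays inside S
theorem pv_sort_pairwise_aux (rd : PySem.Dict String (List String)) (S : List String)
    (hasym : ∀ a ∈ S, ∀ b ∈ S, ¬(pvLt rd a b = true ∧ pvLt rd b a = true))
    (htrans : ∀ a ∈ S, ∀ b ∈ S, ∀ c ∈ S, pvLt rd a b = true → pvLt rd b c = true → pvLt rd a c = true) :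
    ∀ (l acc : List String), (∀ z ∈ l, z ∈ S) → (∀ y ∈ acc, y ∈ S) →
      acc.Pairwise (fun a b => pvLt rd b a = false) →
      (l.foldl (fun acc x => pvInsertCmp (pvCmpB rd) x acc) acc).Pairwise
        (fun a b => pvLt rd b a = false) := by
  intro l
  induction l with
  | nil => intro acc _ _ hp; simpa using hp
  | cons x xs ih =>
    intro acc hl hacc hp
    have hx : x ∈ S := hl x List.mem_cons_self
    rw [List.foldl_cons]
    refine ih _ (fun z hz => hl z (List.mem_cons_of_mem _ hz)) ?_
      (pv_insert_pairwise rd S hasym htrans x hx acc hacc hp)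
    intro y hy
    rcases (pv_mem_insertCmp _ _ _ _).mp hy with hyx | hyacc
    · subst hyx; exact hx
    · exact hacc y hyacc

-- not mis-ordered means pairwise-ordered
theorem pv_pairwise_of_not_mis (rd : PySem.Dict String (List String)) (u : List String)
    (h : pvMisordered rd u = false) :
    u.Pairwise (fun a b => pvLt rd b a = false) := by
  rw [List.pairwise_iff_getElem]
  intro i j hi hj hij
  by_contra hba
  have hba' : pvLt rd u[j] u[i] = true := by revert hba; cases pvLt rd u[j] u[i] <;> simp
  have : pvMisordered rd u = true := by
    unfold pvMisordered
    simp only [List.any_eq_true, List.mem_range]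
    exact ⟨j, hj, u[i], List.mem_take_iff_getElem.mpr ⟨i, by omega, rfl⟩,
      by rwa [List.getD_eq_getElem u "" hj]⟩
  rw [h] at this; exact Bool.false_ne_true this

-- mis-ordered means not pairwise-ordered
theorem pv_not_pairwise_of_mis (rd : PySem.Dict String (List String)) (u : List String)
    (h : pvMisordered rd u = true) :
    ¬ u.Pairwise (fun a b => pvLt rd b a = false) := by
  intro hp
  unfold pvMisordered at h
  simp only [List.any_eq_true, List.mem_range] at h
  obtain ⟨j, hj, e, he, hlt⟩ := h
  obtain ⟨i, hm, hie⟩ := List.mem_take_iff_getElem.mp he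
  have hij : i < j := lt_of_lt_of_le hm (min_le_left _ _)
  have hiu : i < u.length := lt_of_lt_of_le hm (min_le_right _ _)
  have := (List.pairwise_iff_getElem.mp hp) i j hiu hj hij
  rw [List.getD_eq_getElem u "" hj, ← hie] at hlt
  rw [this] at hlt; exact Bool.false_ne_true hlt

-- on a mis-ordered update satisfying the strict-weak-order condition the sort moves something
theorem pv_sort_ne_of_mis (rd : PySem.Dict String (List String)) (u : List String)
    (hmis : pvMisordered rd u = true) (hswo : pvSWO rd u = true) :
    pvSortCmp (pvCmpB rd) u ≠ u := by
  intro heq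
  unfold pvSWO at hswo
  simp only [Bool.and_eq_true, List.all_eq_true] at hswo
  obtain ⟨⟨hasym, htrans⟩, -⟩ := hswo
  have hasym' : ∀ a ∈ u, ∀ b ∈ u, ¬(pvLt rd a b = true ∧ pvLt rd b a = true) := by
    intro a ha b hb hab
    have := hasym a ha b hb
    rw [hab.1, hab.2] at this; simp at this
  have htrans' : ∀ a ∈ u, ∀ b ∈ u, ∀ c ∈ u,
      pvLt rd a b = true → pvLt rd b c = true → pvLt rd a c = true := by
    intro a ha b hb c hc h1 h2
    have := htrans a ha b hb c hc
    rw [h1, h2] at this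
    revert this; cases pvLt rd a c <;> simp
  have hp : (pvSortCmp (pvCmpB rd) u).Pairwise (fun a b => pvLt rd b a = false) :=
    pv_sort_pairwise_aux rd u hasym' htrans' u [] (fun z hz => hz) (by simp) (by simp)
  rw [heq] at hp
  exact pv_not_pairwise_of_mis rd u hmis hp

-- A's detection test IS pvMisordered
theorem pv_condA_eq (rd : PySem.Dict String (List String)) (u : List String) :
    ((PySem.List.enumerate u).any (fun p =>
        !(PySem.Set.inter (PySem.Set.ofList (PySem.List.slice u none (some p.1)))
            (PySem.Set.ofList (rd.getD p.2 []))).isEmpty)) = pvMisordered rd u := by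
  rw [PySem.List.enumerate_eq_map_pyRange (d := "") u, List.any_map]
  rw [Bool.eq_iff_iff]
  unfold pvMisordered
  simp only [List.any_eq_true, List.mem_range, Function.comp_apply, Bool.not_eq_true',
    List.isEmpty_eq_false_iff_exists_mem, PySem.Set.mem_inter, PySem.Set.mem_ofList]
  constructor
  · rintro ⟨j, hj, x, hxt, hxr⟩
    rw [PySem.List.mem_pyRange_one] at hj
    rw [PySem.List.slice_to u hj.1] at hxt
    have hjlen : j.toNat < u.length := by
      have := hj.2; simp only [PySem.List.len] at this; omega
    refine ⟨j.toNat, hjlen, ?_⟩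
    refine ⟨x, hxt, ?_⟩
    unfold pvLt
    rw [List.getD_eq_getElem u "" hjlen]
    rw [PySem.List.pyGetD_eq_getElem u (i := j) "" hj.1 (by simpa [PySem.List.len] using hj.2)] at hxr
    simpa using hxr
  · rintro ⟨j, hj, hany⟩
    obtain ⟨e, he, hlt⟩ := hany
    refine ⟨(j : Int), ?_, e, ?_, ?_⟩
    · rw [PySem.List.mem_pyRange_one]
      simp [PySem.List.len]; omega
    · rw [PySem.List.slice_to u (by positivity)]
      simpa using he
    · unfold pvLt at hlt
      rw [List.getD_eq_getElem u "" hj] at hlt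
      rw [PySem.List.pyGetD_eq_getElem u (i := (j : Int)) "" (by positivity) (by simpa [PySem.List.len] using hj)]
      simpa [Int.toNat_natCast] using hlt

-- conditional accumulation is a filtered sum
theorem pv_foldl_if_add (c : List String → Prop) [DecidablePred c] (g : List String → Int)
    (l : List (List String)) (t : Int) :
    l.foldl (fun t u => if c u then t + g u else t) t =
      t + ((l.filter (fun u => decide (c u))).map g).sum := by
  induction l generalizing t with
  | nil => simp
  | cons u l ih =>
    simp only [List.foldl_cons, List.filter_cons]
    by_cases h : c u <;> simp [h, ih, add_assoc]

-- ===== VERDICT (by name: the statement is the Claim_ definition above) =====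
theorem fix_and_count_incorrect_spec : Claim_equal_fix_and_count_incorrect := by
  intro rules updates _hdom hpre
  obtain ⟨hnd, hup⟩ := hpre
  unfold Spec_fix_and_count_incorrect
  simp only [fix_and_count_incorrect, fix_and_count_incorrect_alt]
  rw [pv_foldl_if_add
        (fun u => pvSortCmp (pvCmpB (PySem.Dict.mk rules)) u ≠ u)
        (fun u => (PySem.Int.ofStr? (PySem.List.pyGetD (pvSortCmp (pvCmpB (PySem.Dict.mk rules)) u)
            (PySem.Int.floordiv (PySem.List.len (pvSortCmp (pvCmpB (PySem.Dict.mk rules)) u)) 2) "")).getD 0)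
        updates 0,
      pv_cmp_eq rules hnd,
      PySem.List.foldl_append_if (f := fun u => u)]
  rw [List.nil_append, List.map_map, zero_add]
  have hcond : ∀ u ∈ updates,
      ((PySem.List.enumerate u).any (fun p =>
          !(PySem.Set.inter (PySem.Set.ofList (PySem.List.slice u none (some p.1)))
              (PySem.Set.ofList ((PySem.Dict.mk rules).getD p.2 []))).isEmpty)) =
        decide (pvSortCmp (pvCmpB (PySem.Dict.mk rules)) u ≠ u) := by
    intro u hu
    rw [pv_condA_eq]
    cases hm : pvMisordered (PySem.Dict.mk rules) u with
    | false =>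
      have hid := pv_sort_id (PySem.Dict.mk rules) u
        (pv_pairwise_of_not_mis (PySem.Dict.mk rules) u hm)
      rw [hid]
      simp
    | true =>
      obtain ⟨-, hswo⟩ := hup u hu hm
      have hne := pv_sort_ne_of_mis (PySem.Dict.mk rules) u hm hswo
      simp [hne]
  rw [List.filter_congr hcond, List.map_id']
  apply congrArg List.sum
  apply List.map_congr_left
  intro u hu
  simp [Function.comp]
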